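-- pv_equiv track=rewrite | github.com/steveway/papagayo-ng | auto_recognition.py | get_level_peaks
-- ===== SOURCE A (Python) =====
-- def get_level_peaks(v):
--     """Find peaks in the audio level data for visualization"""
--     peaks = [0]
--
--     i = 1
--     while i < len(v) - 1:
--         pos_left = i
--         pos_right = i
--
--         while v[pos_left] == v[i] and pos_left > 0:
--             pos_left -= 1
--
--         while v[pos_right] == v[i] and pos_right < len(v) - 1:
--             pos_right += 1
--
--         # is_lower_peak = v[pos_left] > v[i] and v[i] < v[pos_right]
--         is_upper_peak = v[pos_left] < v[i] and v[i] > v[pos_right]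
--
--         if is_upper_peak:
--             peaks.append(i)
--
--         i = pos_right
--
--     peaks.append(len(v) - 1)
--     return peaks
-- ===== SOURCE B (Python) =====
-- def get_level_peaks(v):
--     """Find peaks in the audio level data for visualization"""
--     # group v into maximal runs of equal values: (start_index, value)
--     runs = []
--     for i, x in enumerate(v):
--         if not runs or runs[-1][1] != x:
--             runs.append((i, x))
--     peaks = [0]
--     for left, mid, right in zip(runs, runs[1:], runs[2:]):
--         if left[1] < mid[1] and mid[1] > right[1]:
--             peaks.append(mid[0])
--     peaks.append(len(v) - 1)
--     return peaks
-- ===== Notes on version B (the rewrite author's own statement) =====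
-- stated objective: simpler
-- what changed: Replaces the index-juggling while loop with inner left/right rescans by a single pass building (start,value) runs plus a neighbour test on each interior run; the rescans' repeated indexing disappears, a constant-factor speedup.
import Mathlib
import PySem

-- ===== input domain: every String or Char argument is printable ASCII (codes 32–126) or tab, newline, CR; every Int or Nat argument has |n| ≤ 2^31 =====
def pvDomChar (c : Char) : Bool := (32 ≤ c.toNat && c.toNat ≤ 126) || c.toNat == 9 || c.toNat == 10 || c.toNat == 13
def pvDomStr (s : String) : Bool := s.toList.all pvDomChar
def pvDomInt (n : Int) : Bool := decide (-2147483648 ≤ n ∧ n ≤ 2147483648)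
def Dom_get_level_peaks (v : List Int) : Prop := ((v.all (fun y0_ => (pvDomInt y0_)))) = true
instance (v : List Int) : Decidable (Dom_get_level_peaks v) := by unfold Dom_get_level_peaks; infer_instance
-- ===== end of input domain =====

-- B replaces A's index-juggling while loop (with its inner left/right rescans) by one pass
-- building (start, value) runs and a neighbour test on each interior run; same return value.

-- ===== PORT A =====
-- inner `while v[pos_left] == v[i] and pos_left > 0: pos_left -= 1`
-- (every index A reads is in range on every execution, so v[j] is ported as pyGetD v j 0)
def pvA_left (v : List Int) (vi : Int) (p : Int) : Nat → Int
  | 0 => p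
  | fuel + 1 =>
    if PySem.List.pyGetD v p 0 = vi ∧ p > 0 then pvA_left v vi (p - 1) fuel else p

-- inner `while v[pos_right] == v[i] and pos_right < len(v) - 1: pos_right += 1`
def pvA_right (v : List Int) (vi : Int) (p : Int) : Nat → Int
  | 0 => p
  | fuel + 1 =>
    if PySem.List.pyGetD v p 0 = vi ∧ p < (v.length : Int) - 1 then pvA_right v vi (p + 1) fuel else p

-- outer `while i < len(v) - 1` loop; i strictly increases each iteration, so fuel len(v)+1 suffices
def pvA_loop (v : List Int) (peaks : List Int) (i : Int) : Nat → List Int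
  | 0 => peaks
  | fuel + 1 =>
    if i < (v.length : Int) - 1 then
      let pos_left := pvA_left v (PySem.List.pyGetD v i 0) i (v.length + 1)
      let pos_right := pvA_right v (PySem.List.pyGetD v i 0) i (v.length + 1)
      let peaks' := if PySem.List.pyGetD v pos_left 0 < PySem.List.pyGetD v i 0 ∧
                       PySem.List.pyGetD v i 0 > PySem.List.pyGetD v pos_right 0
                    then peaks ++ [i] else peaks
      pvA_loop v peaks' pos_right fuel
    else peaks

def get_level_peaks (v : List Int) : List Int :=
  pvA_loop v [0] 1 (v.length + 1) ++ [(v.length : Int) - 1]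

-- ===== PORT B =====
-- `for i, x in enumerate(v): if not runs or runs[-1][1] != x: runs.append((i, x))`
-- (recursion carrying the last appended run's value and the current index)
def pvB_runsAux (prev : Int) (i : Int) : List Int → List (Int × Int)
  | [] => []
  | x :: xs => if x ≠ prev then (i, x) :: pvB_runsAux x (i + 1) xs else pvB_runsAux prev (i + 1) xs

def pvB_runs : List Int → List (Int × Int)
  | [] => []
  | x :: xs => (0, x) :: pvB_runsAux x 1 xs

-- `for left, mid, right in zip(runs, runs[1:], runs[2:]): …`
def pvB_mid : List (Int × Int) → List Int
  | (_, a) :: (s, b) :: (t, c) :: rest =>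
      (if a < b ∧ b > c then [s] else []) ++ pvB_mid ((s, b) :: (t, c) :: rest)
  | _ => []
termination_by l => l.length

def get_level_peaks_alt (v : List Int) : List Int :=
  ([0] ++ pvB_mid (pvB_runs v)) ++ [(v.length : Int) - 1]

-- ===== PRECONDITION & SPEC =====
def Spec_get_level_peaks (v : List Int) (out : List Int) : Prop := out = get_level_peaks_alt v
instance (v : List Int) (out : List Int) : Decidable (Spec_get_level_peaks v out) := by unfold Spec_get_level_peaks; infer_instance

-- ===== CLAIM (what is proved, stated in full; the proofs are below) =====
def Claim_equal_get_level_peaks : Prop := ∀ (v : List Int), Dom_get_level_peaks v → Spec_get_level_peaks v (get_level_peaks v)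

-- ===== LEMMAS AND PROOFS =====

-- `pvRuns v s a rs` : rs is the maximal-run decomposition of v from position s onward,
-- the run starting at s having value a.
inductive pvRuns (v : List Int) : Int → Int → List (Int × Int) → Prop where
  | last (s a : Int) : 0 ≤ s → s < (v.length : Int) →
      (∀ j, s ≤ j → j < (v.length : Int) → PySem.List.pyGetD v j 0 = a) →
      pvRuns v s a [(s, a)]
  | cons (s a t : Int) (rs : List (Int × Int)) : 0 ≤ s → s < t → t < (v.length : Int) →
      (∀ j, s ≤ j → j < t → PySem.List.pyGetD v j 0 = a) →
      PySem.List.pyGetD v t 0 ≠ a →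
      pvRuns v t (PySem.List.pyGetD v t 0) rs →
      pvRuns v s a ((s, a) :: rs)

lemma pvRuns_head (v : List Int) {s a : Int} {rs : List (Int × Int)}
    (h : pvRuns v s a rs) : ∃ tl, rs = (s, a) :: tl := by
  cases h <;> exact ⟨_, rfl⟩

-- B's run builder produces a pvRuns decomposition
lemma pvB_runsAux_runs (v : List Int) :
    ∀ (xs : List Int) (i s : Nat) (pv : Int),
      v.drop i = xs → s < i → i ≤ v.length →
      (∀ j : Int, (s : Int) ≤ j → j < (i : Int) → PySem.List.pyGetD v j 0 = pv) →
      pvRuns v s pv (((s : Int), pv) :: pvB_runsAux pv i xs) := by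
  intro xs
  induction xs with
  | nil =>
    intro i s pv hdrop hsi hil hreg
    have hil' : v.length ≤ i := by
      by_contra hc
      push Not at hc
      have := List.drop_eq_nil_iff.mp hdrop
      omega
    have : i = v.length := by omega
    subst this
    exact pvRuns.last _ _ (by omega) (by exact_mod_cast hsi) (fun j h1 h2 => hreg j h1 (by exact_mod_cast h2))
  | cons x xs' ih =>
    intro i s pv hdrop hsi hil hreg
    have hiv : i < v.length := by
      by_contra hc
      push Not at hc
      rw [List.drop_eq_nil_of_le hc] at hdrop
      simp at hdrop
    have hdrop' : v.drop (i + 1) = xs' := by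
      have := List.tail_drop (l := v) (i := i)
      rw [hdrop] at this; simpa using this.symm
    have hvi : PySem.List.pyGetD v (i : Int) 0 = x := by
      rw [PySem.List.pyGetD_natCast, List.getD_eq_getElem v 0 hiv]
      have h2 := List.getElem_drop (xs := v) (i := i) (j := 0) (h := by simp [hdrop])
      simp only [hdrop, List.getElem_cons_zero, Nat.add_zero] at h2
      exact h2.symm
    by_cases hx : x ≠ pv
    · rw [pvB_runsAux, if_pos hx]
      have hnext : pvRuns v (i : Int) x (((i : Int), x) :: pvB_runsAux x (↑i + 1) xs') := by
        have := ih (i + 1) i x hdrop' (by omega) (by omega)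
          (fun j h1 h2 => by
            have : j = (i : Int) := by push_cast at h2 ⊢; omega
            rw [this, hvi])
        push_cast at this
        exact this
      refine pvRuns.cons _ _ _ _ (by positivity) (by exact_mod_cast hsi) (by exact_mod_cast hiv)
        (fun j h1 h2 => hreg j h1 h2) (by rw [hvi]; exact hx) (by rw [hvi]; exact hnext)
    · push Not at hx
      subst hx
      rw [pvB_runsAux, if_neg (by simp)]
      have := ih (i + 1) s x hdrop' (by omega) (by omega)
        (fun j h1 h2 => by
          push_cast at h2
          rcases lt_or_eq_of_le (Int.lt_add_one_iff.mp h2) with h | h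
          · exact hreg j h1 (by exact_mod_cast h)
          · rw [h]; exact hvi)
      push_cast at this
      exact this

-- right scan stops at the first index e ≥ i where the value changes or e = len-1
lemma pvA_right_eq (v : List Int) (vi : Int) :
    ∀ (fuel : Nat) (i e : Int), i ≤ e → e ≤ (v.length : Int) - 1 →
      (∀ j, i ≤ j → j < e → PySem.List.pyGetD v j 0 = vi) →
      (e = (v.length : Int) - 1 ∨ PySem.List.pyGetD v e 0 ≠ vi) →
      (e - i).toNat < fuel →
      pvA_right v vi i fuel = e := by
  intro fuel
  induction fuel with
  | zero => intro i e _ _ _ _ hf; omega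
  | succ f ih =>
    intro i e hie hel hreg hstop hf
    rcases eq_or_lt_of_le hie with rfl | hlt
    · have : ¬ (PySem.List.pyGetD v i 0 = vi ∧ i < (v.length : Int) - 1) := by
        rcases hstop with h1 | h2
        · omega
        · tauto
      simp [pvA_right, this]
    · have hvi : PySem.List.pyGetD v i 0 = vi := hreg i le_rfl hlt
      have hcond : PySem.List.pyGetD v i 0 = vi ∧ i < (v.length : Int) - 1 := ⟨hvi, by omega⟩
      rw [pvA_right, if_pos hcond]
      exact ih (i + 1) e (by omega) hel (fun j h1 h2 => hreg j (by omega) h2) hstop (by omega)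

-- left scan from inside a run whose leftmost index is t
lemma pvA_left_eq (v : List Int) (vi : Int) :
    ∀ (fuel : Nat) (i t : Int), 0 ≤ t → t ≤ i →
      (∀ j, t ≤ j → j ≤ i → PySem.List.pyGetD v j 0 = vi) →
      (t = 0 ∨ PySem.List.pyGetD v (t - 1) 0 ≠ vi) →
      (i - t).toNat + 1 < fuel →
      pvA_left v vi i fuel = if t = 0 then 0 else t - 1 := by
  intro fuel
  induction fuel with
  | zero => intro i t _ _ _ _ hf; omega
  | succ f ih =>
    intro i t ht hti hreg hstop hf
    have hvi : PySem.List.pyGetD v i 0 = vi := hreg i hti le_rfl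
    rcases eq_or_lt_of_le hti with rfl | hlt
    · by_cases h0 : t = 0
      · subst h0
        simp [pvA_left]
      · have hne : PySem.List.pyGetD v (t - 1) 0 ≠ vi := by tauto
        have hcond : PySem.List.pyGetD v t 0 = vi ∧ t > 0 := ⟨hvi, by omega⟩
        rw [pvA_left, if_pos hcond]
        obtain ⟨f', rfl⟩ : ∃ f', f = f' + 1 := ⟨f - 1, by omega⟩
        rw [pvA_left, if_neg (by tauto)]
        simp [h0]
    · have hcond : PySem.List.pyGetD v i 0 = vi ∧ i > 0 := ⟨hvi, by omega⟩
      rw [pvA_left, if_pos hcond]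
      exact ih (i - 1) t ht (by omega) (fun j h1 h2 => hreg j h1 (by omega)) hstop (by omega)

lemma pvA_loop_stop (v : List Int) (peaks : List Int) (i : Int) (fuel : Nat)
    (h : ¬ i < (v.length : Int) - 1) : pvA_loop v peaks i fuel = peaks := by
  cases fuel with
  | zero => rfl
  | succ f => simp [pvA_loop, h]

lemma pvB_mid_cons (x pv s a t b : Int) (rest : List (Int × Int)) :
    pvB_mid ((x, pv) :: (s, a) :: (t, b) :: rest)
      = (if pv < a ∧ a > b then [s] else []) ++ pvB_mid ((s, a) :: (t, b) :: rest) := by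
  rw [pvB_mid]

lemma pvB_mid_two (x pv s a : Int) : pvB_mid [(x, pv), (s, a)] = [] := by
  rw [pvB_mid.eq_def]

lemma pvB_mid_one (s a : Int) : pvB_mid [(s, a)] = [] := by
  rw [pvB_mid.eq_def]

lemma pvB_mid_nil : pvB_mid [] = [] := by
  rw [pvB_mid.eq_def]

-- main loop invariant: from the start s of a run (s ≥ 1, previous value pv),
-- A's loop appends exactly B's interior peaks of the remaining runs
lemma pvA_loop_eq (v : List Int) {s a : Int} {rs : List (Int × Int)}
    (h : pvRuns v s a rs) :
    ∀ (pv x : Int) (peaks : List Int) (fuel : Nat), 1 ≤ s →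
      PySem.List.pyGetD v (s - 1) 0 = pv → pv ≠ a →
      ((v.length : Int) - s).toNat ≤ fuel →
      pvA_loop v peaks s fuel = peaks ++ pvB_mid ((x, pv) :: rs) := by
  induction h with
  | last s a h0 hs hreg =>
    intro pv x peaks fuel h1s hpv hpva hfuel
    rw [pvB_mid_two]
    by_cases hc : s < (v.length : Int) - 1
    · obtain ⟨f, rfl⟩ : ∃ f, fuel = f + 1 := ⟨fuel - 1, by omega⟩
      have hva : PySem.List.pyGetD v s 0 = a := hreg s le_rfl hs
      have hlast : PySem.List.pyGetD v ((v.length : Int) - 1) 0 = a := hreg _ (by omega) (by omega)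
      have hR : pvA_right v (PySem.List.pyGetD v s 0) s (v.length + 1) = (v.length : Int) - 1 :=
        pvA_right_eq v _ _ s _ (by omega) le_rfl
          (fun j h1 h2 => (hreg j h1 (by omega)).trans hva.symm) (Or.inl rfl) (by omega)
      rw [pvA_loop, if_pos hc]
      simp only [hR]
      rw [if_neg (by rintro ⟨-, h2⟩; rw [hva, hlast] at h2; omega)]
      rw [pvA_loop_stop v peaks _ f (by omega)]
      simp
    · rw [pvA_loop_stop v peaks s fuel hc]
      simp
  | cons s a t rs h0 hst htlen hreg hne hrt ih =>
    intro pv x peaks fuel h1s hpv hpva hfuel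
    obtain ⟨rest, hrs⟩ := pvRuns_head v hrt
    have hva : PySem.List.pyGetD v s 0 = a := hreg s le_rfl hst
    have hc : s < (v.length : Int) - 1 := by omega
    obtain ⟨f, rfl⟩ : ∃ f, fuel = f + 1 := ⟨fuel - 1, by omega⟩
    have hR : pvA_right v (PySem.List.pyGetD v s 0) s (v.length + 1) = t :=
      pvA_right_eq v _ _ s t (le_of_lt hst) (by omega)
        (fun j h1 h2 => (hreg j h1 h2).trans hva.symm)
        (Or.inr (by rw [hva]; exact hne)) (by omega)
    have hL : pvA_left v (PySem.List.pyGetD v s 0) s (v.length + 1) = s - 1 := by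
      have := pvA_left_eq v (PySem.List.pyGetD v s 0) (v.length + 1) s s (by omega) le_rfl
        (fun j h1 h2 => by have : j = s := le_antisymm h2 h1; rw [this])
        (Or.inr (by rw [hpv, hva]; exact hpva)) (by omega)
      rw [this, if_neg (by omega)]
    rw [hva] at hL hR
    rw [pvA_loop, if_pos hc, hva]
    simp only [hL, hR, hpv]
    have hIH := ih a s (if pv < a ∧ a > PySem.List.pyGetD v t 0 then peaks ++ [s] else peaks) f
      (by omega) (hreg (t - 1) (by omega) (by omega)) (Ne.symm hne) (by omega)
    rw [hIH, hrs, pvB_mid_cons]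
    split_ifs <;> simp

lemma pv_main (v : List Int) : get_level_peaks v = get_level_peaks_alt v := by
  cases v with
  | nil =>
    simp [get_level_peaks, get_level_peaks_alt, pvB_runs, pvB_mid_nil, pvA_loop]
  | cons w ws =>
    unfold get_level_peaks get_level_peaks_alt
    rw [show pvB_runs (w :: ws) = (0, w) :: pvB_runsAux w 1 ws from rfl]
    congr 1
    have hrun : pvRuns (w :: ws) 0 w ((0, w) :: pvB_runsAux w 1 ws) := by
      have := pvB_runsAux_runs (w :: ws) ws 1 0 w (by simp) (by omega) (by simp)
        (fun j h1 h2 => by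
          have : j = 0 := by omega
          rw [this]; exact PySem.List.pyGetD_zero_cons w ws 0)
      simpa using this
    generalize haux : pvB_runsAux w 1 ws = aux at hrun ⊢
    cases hrun with
    | last _ _ h0 hs hreg =>
      rw [pvB_mid_one]
      by_cases hc : (1 : Int) < ((w :: ws).length : Int) - 1
      · have hva1 : PySem.List.pyGetD (w :: ws) 1 0 = w := hreg 1 (by omega) (by omega)
        have hv0 : PySem.List.pyGetD (w :: ws) 0 0 = w := hreg 0 (by omega) (by omega)
        have hR : pvA_right (w :: ws) (PySem.List.pyGetD (w :: ws) 1 0) 1 ((w :: ws).length + 1)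
            = ((w :: ws).length : Int) - 1 :=
          pvA_right_eq _ _ _ 1 _ (by omega) le_rfl
            (fun j h1 h2 => (hreg j (by omega) (by omega)).trans hva1.symm) (Or.inl rfl) (by omega)
        have hL : pvA_left (w :: ws) (PySem.List.pyGetD (w :: ws) 1 0) 1 ((w :: ws).length + 1) = 0 := by
          have := pvA_left_eq (w :: ws) (PySem.List.pyGetD (w :: ws) 1 0) ((w :: ws).length + 1) 1 0
            (by omega) (by omega)
            (fun j h1 h2 => (hreg j h1 (by omega)).trans hva1.symm)
            (Or.inl rfl) (by omega)
          rw [this, if_pos rfl]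
        rw [pvA_loop, if_pos hc]
        simp only [hR, hL]
        rw [if_neg (by
          rintro ⟨h1, -⟩
          rw [hv0, hva1] at h1
          omega)]
        rw [pvA_loop_stop _ _ _ _ (by omega)]
        simp
      · rw [pvA_loop_stop _ _ _ _ hc]
        simp
    | cons _ _ t rs h0 h0t htlen hreg hne hrt =>
      by_cases ht1 : t = 1
      · subst ht1
        have := pvA_loop_eq (w :: ws) hrt w 0 [0] ((w :: ws).length + 1) le_rfl
          (hreg 0 (by omega) (by omega)) (Ne.symm hne) (by omega)
        simpa using this
      · have hc : (1 : Int) < ((w :: ws).length : Int) - 1 := by omega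
        have hva1 : PySem.List.pyGetD (w :: ws) 1 0 = w := hreg 1 (by omega) (by omega)
        have hv0 : PySem.List.pyGetD (w :: ws) 0 0 = w := hreg 0 (by omega) (by omega)
        have hR : pvA_right (w :: ws) (PySem.List.pyGetD (w :: ws) 1 0) 1 ((w :: ws).length + 1) = t :=
          pvA_right_eq _ _ _ 1 t (by omega) (by omega)
            (fun j h1 h2 => (hreg j (by omega) h2).trans hva1.symm)
            (Or.inr (by rw [hva1]; exact hne)) (by omega)
        have hL : pvA_left (w :: ws) (PySem.List.pyGetD (w :: ws) 1 0) 1 ((w :: ws).length + 1) = 0 := by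
          have := pvA_left_eq (w :: ws) (PySem.List.pyGetD (w :: ws) 1 0) ((w :: ws).length + 1) 1 0
            (by omega) (by omega)
            (fun j h1 h2 => (hreg j h1 (by omega)).trans hva1.symm)
            (Or.inl rfl) (by omega)
          rw [this, if_pos rfl]
        rw [pvA_loop, if_pos hc]
        simp only [hR, hL]
        rw [if_neg (by
          rintro ⟨h1, -⟩
          rw [hv0, hva1] at h1
          omega)]
        have := pvA_loop_eq (w :: ws) hrt w 0 [0] ((w :: ws).length) (by omega)
          (hreg (t - 1) (by omega) (by omega)) (Ne.symm hne) (by omega)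
        simpa using this

-- ===== VERDICT (by name: the statement is the Claim_ definition above) =====
theorem get_level_peaks_spec : Claim_equal_get_level_peaks := by
  intro v _
  unfold Spec_get_level_peaks
  exact pv_main v
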